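-- pv_equiv track=rewrite | github.com/ayush-garg341/python | data_structures/two_pointers/mim_window_sort.py | mim_window_sort
-- ===== SOURCE A (Python) =====
-- import math
--
-- def mim_window_sort(arr):
--     n = len(arr)
--     mim_num = math.inf
--     for i in range(1, n):
--         if arr[i] < arr[i - 1]:
--             mim_num = min(mim_num, arr[i])
--
--     max_num = -math.inf
--     for i in range(n - 2, -1, -1):
--         if arr[i] > arr[i + 1]:
--             max_num = max(max_num, arr[i])
--
--     low = 0
--     for i in range(n):
--         if arr[i] > mim_num:
--             low = i
--             break
--
--     high = n - 1
--     for i in range(n - 1, -1, -1):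
--         if arr[i] < max_num:
--             high = i
--             break
--
--     if mim_num == math.inf and max_num == -math.inf:
--         return 0
--
--     return high - low + 1
-- ===== SOURCE B (Python) =====
-- def mim_window_sort(arr):
--     s = sorted(arr)
--     lo = next((i for i, (x, y) in enumerate(zip(arr, s)) if x != y), None)
--     if lo is None:
--         return 0
--     hi = len(arr) - 1 - next(i for i, (x, y) in enumerate(zip(reversed(arr), reversed(s))) if x != y)
--     return hi - lo + 1
-- ===== Notes on version B (the rewrite author's own statement) =====
-- stated objective: simpler
-- what changed: Replaces A's four dip/bump/boundary scan passes over adjacent elements by sort-then-compare: B sorts a copy and returns the span between the first and last index where arr differs from sorted(arr) (0 if none).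
import Mathlib
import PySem

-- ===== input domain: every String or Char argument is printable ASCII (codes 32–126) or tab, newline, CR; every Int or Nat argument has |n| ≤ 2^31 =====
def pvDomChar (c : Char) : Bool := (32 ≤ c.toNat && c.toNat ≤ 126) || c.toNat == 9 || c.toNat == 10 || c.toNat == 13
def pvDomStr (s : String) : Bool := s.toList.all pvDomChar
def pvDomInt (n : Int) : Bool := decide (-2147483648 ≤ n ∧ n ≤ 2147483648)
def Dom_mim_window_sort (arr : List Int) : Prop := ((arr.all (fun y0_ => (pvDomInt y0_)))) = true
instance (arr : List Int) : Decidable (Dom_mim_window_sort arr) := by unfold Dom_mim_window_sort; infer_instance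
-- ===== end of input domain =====

-- B replaces A's four dip/bump/boundary passes by sort-then-compare: first/last index where arr differs
-- from sorted(arr) (objective: simpler; return value only, neither program mutates its argument).

-- ===== PORT A =====
-- arr[i] for an index known to be in range (Python list indexing)
def pvGet (arr : List Int) (i : Int) : Int := PySem.List.pyGetD arr i 0

-- mim_num loop: math.inf is modelled as `none` (min(inf, x) = x; arr[i] > inf is false)
def mimLoop (arr : List Int) : Option Int :=
  (PySem.List.pyRange 1 (arr.length : Int) 1).foldl
    (fun m i => if pvGet arr i < pvGet arr (i - 1) then
        some (match m with | none => pvGet arr i | some y => min y (pvGet arr i))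
      else m) none

-- max_num loop: -math.inf is modelled as `none`
def maxLoop (arr : List Int) : Option Int :=
  (PySem.List.pyRange ((arr.length : Int) - 2) (-1) (-1)).foldl
    (fun m i => if pvGet arr i > pvGet arr (i + 1) then
        some (match m with | none => pvGet arr i | some y => max y (pvGet arr i))
      else m) none

-- `x > mim_num` where mim_num may still be math.inf (`none`)
def gtOpt (x : Int) : Option Int → Bool
  | none => false
  | some v => v < x

-- `x < max_num` where max_num may still be -math.inf (`none`)
def ltOpt (x : Int) : Option Int → Bool
  | none => false
  | some v => x < v

-- `for i in range(n): if arr[i] > mim_num: low = i; break` (low initialised to 0)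
def lowLoop (arr : List Int) (mim : Option Int) : List Int → Int
  | [] => 0
  | i :: rest => if gtOpt (pvGet arr i) mim then i else lowLoop arr mim rest

-- `for i in range(n-1,-1,-1): if arr[i] < max_num: high = i; break` (high initialised to n-1)
def highLoop (arr : List Int) (mx : Option Int) : List Int → Int
  | [] => (arr.length : Int) - 1
  | i :: rest => if ltOpt (pvGet arr i) mx then i else highLoop arr mx rest

def mim_window_sort (arr : List Int) : Int :=
  let n : Int := arr.length
  let mim := mimLoop arr
  let mx := maxLoop arr
  let low := lowLoop arr mim (PySem.List.pyRange 0 n 1)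
  let high := highLoop arr mx (PySem.List.pyRange (n - 1) (-1) (-1))
  if mim = none ∧ mx = none then 0 else high - low + 1

-- ===== PORT B =====
-- index of the first position where the two lists differ (none if they agree)
def firstDiff : List Int → List Int → Option Nat
  | x :: xs, y :: ys => if x = y then (firstDiff xs ys).map (· + 1) else some 0
  | _, _ => none

def mim_window_sort_alt (arr : List Int) : Int :=
  let s := PySem.List.sorted arr (fun x => x) false
  match firstDiff arr s with
  | none => 0
  | some lo =>
    let hi : Int := (arr.length : Int) - 1 - ((firstDiff arr.reverse s.reverse).getD 0 : Int)
    hi - (lo : Int) + 1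

-- ===== PRECONDITION & SPEC =====
def Spec_mim_window_sort (arr : List Int) (out : Int) : Prop := out = mim_window_sort_alt arr
instance (arr : List Int) (out : Int) : Decidable (Spec_mim_window_sort arr out) := by
  unfold Spec_mim_window_sort; infer_instance

-- ===== CLAIM (what is proved, stated in full; the proofs are below) =====
def Claim_equal_mim_window_sort : Prop :=
  ∀ (arr : List Int), Dom_mim_window_sort arr → Spec_mim_window_sort arr (mim_window_sort arr)

-- ===== LEMMAS AND PROOFS =====

-- abbreviation used only in proofs: arr[k] for a Nat index
def pvA (arr : List Int) (k : Nat) : Int := arr.getD k 0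

theorem pvGet_natCast (arr : List Int) (k : Nat) : pvGet arr (k : Int) = pvA arr k :=
  PySem.List.pyGetD_natCast arr k 0

-- a descent between positions j and j+1
def pvDesc (arr : List Int) (j : Nat) : Prop :=
  j + 1 < arr.length ∧ pvA arr (j + 1) < pvA arr j

-- ---- generic characterisation of the two min/max folds ----

theorem foldMin_none_iff (p : Int → Prop) [DecidablePred p] (f : Int → Int)
    (l : List Int) (acc : Option Int) :
    l.foldl (fun m i => if p i then
        some (match m with | none => f i | some y => min y (f i)) else m) acc = none ↔
      acc = none ∧ ∀ i ∈ l, ¬ p i := by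
  induction l generalizing acc with
  | nil => simp
  | cons x xs ih =>
    simp only [List.foldl_cons, ih, List.mem_cons]
    constructor
    · rintro ⟨h1, h2⟩
      split at h1
      · simp at h1
      · exact ⟨h1, by rename_i hp; rintro i (rfl | hi); exact hp; exact h2 i hi⟩
    · rintro ⟨h1, h2⟩
      rw [if_neg (h2 x (Or.inl rfl))]
      exact ⟨h1, fun i hi => h2 i (Or.inr hi)⟩

theorem foldMin_le (p : Int → Prop) [DecidablePred p] (f : Int → Int)
    (l : List Int) (acc : Option Int) (m : Int)
    (h : l.foldl (fun m i => if p i then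
        some (match m with | none => f i | some y => min y (f i)) else m) acc = some m) :
    (∀ y, acc = some y → m ≤ y) ∧ (∀ i ∈ l, p i → m ≤ f i) := by
  induction l generalizing acc with
  | nil => simp_all
  | cons x xs ih =>
    simp only [List.foldl_cons] at h
    rcases ih _ h with ⟨hacc, hrest⟩
    by_cases hp : p x
    · rw [if_pos hp] at hacc
      have hx : m ≤ f x := by
        cases acc with
        | none => exact hacc _ rfl
        | some y => exact (le_min_iff.mp (hacc (min y (f x)) rfl)).2
      refine ⟨fun y hy => ?_, fun i hi => ?_⟩
      · subst hy
        exact (le_min_iff.mp (hacc (min y (f x)) rfl)).1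
      · rcases List.mem_cons.mp hi with rfl | hi'
        · exact fun _ => hx
        · exact hrest i hi'
    · rw [if_neg hp] at hacc
      refine ⟨hacc, fun i hi => ?_⟩
      rcases List.mem_cons.mp hi with rfl | hi'
      · exact fun hc => absurd hc hp
      · exact hrest i hi'

theorem foldMin_mem (p : Int → Prop) [DecidablePred p] (f : Int → Int)
    (l : List Int) (acc : Option Int) (m : Int)
    (h : l.foldl (fun m i => if p i then
        some (match m with | none => f i | some y => min y (f i)) else m) acc = some m) :
    acc = some m ∨ ∃ i ∈ l, p i ∧ f i = m := by
  induction l generalizing acc with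
  | nil => simp_all
  | cons x xs ih =>
    simp only [List.foldl_cons] at h
    rcases ih _ h with hacc | ⟨i, hi, hp, hf⟩
    · by_cases hp : p x
      · rw [if_pos hp] at hacc
        cases acc with
        | none => simp at hacc; exact Or.inr ⟨x, List.mem_cons_self, hp, hacc⟩
        | some y =>
          simp at hacc
          rcases min_choice y (f x) with hc | hc
          · exact Or.inl (by rw [← hacc, hc])
          · exact Or.inr ⟨x, List.mem_cons_self, hp, by omega⟩
      · rw [if_neg hp] at hacc; exact Or.inl hacc
    · exact Or.inr ⟨i, List.mem_cons_of_mem _ hi, hp, hf⟩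

theorem foldMax_none_iff (p : Int → Prop) [DecidablePred p] (f : Int → Int)
    (l : List Int) (acc : Option Int) :
    l.foldl (fun m i => if p i then
        some (match m with | none => f i | some y => max y (f i)) else m) acc = none ↔
      acc = none ∧ ∀ i ∈ l, ¬ p i := by
  induction l generalizing acc with
  | nil => simp
  | cons x xs ih =>
    simp only [List.foldl_cons, ih, List.mem_cons]
    constructor
    · rintro ⟨h1, h2⟩
      split at h1
      · simp at h1
      · exact ⟨h1, by rename_i hp; rintro i (rfl | hi); exact hp; exact h2 i hi⟩
    · rintro ⟨h1, h2⟩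
      rw [if_neg (h2 x (Or.inl rfl))]
      exact ⟨h1, fun i hi => h2 i (Or.inr hi)⟩

theorem foldMax_ge (p : Int → Prop) [DecidablePred p] (f : Int → Int)
    (l : List Int) (acc : Option Int) (m : Int)
    (h : l.foldl (fun m i => if p i then
        some (match m with | none => f i | some y => max y (f i)) else m) acc = some m) :
    (∀ y, acc = some y → y ≤ m) ∧ (∀ i ∈ l, p i → f i ≤ m) := by
  induction l generalizing acc with
  | nil => simp_all
  | cons x xs ih =>
    simp only [List.foldl_cons] at h
    rcases ih _ h with ⟨hacc, hrest⟩
    by_cases hp : p x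
    · rw [if_pos hp] at hacc
      have hx : f x ≤ m := by
        cases acc with
        | none => exact hacc _ rfl
        | some y => exact (max_le_iff.mp (hacc (max y (f x)) rfl)).2
      refine ⟨fun y hy => ?_, fun i hi => ?_⟩
      · subst hy
        exact (max_le_iff.mp (hacc (max y (f x)) rfl)).1
      · rcases List.mem_cons.mp hi with rfl | hi'
        · exact fun _ => hx
        · exact hrest i hi'
    · rw [if_neg hp] at hacc
      refine ⟨hacc, fun i hi => ?_⟩
      rcases List.mem_cons.mp hi with rfl | hi'
      · exact fun hc => absurd hc hp
      · exact hrest i hi'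

theorem foldMax_mem (p : Int → Prop) [DecidablePred p] (f : Int → Int)
    (l : List Int) (acc : Option Int) (m : Int)
    (h : l.foldl (fun m i => if p i then
        some (match m with | none => f i | some y => max y (f i)) else m) acc = some m) :
    acc = some m ∨ ∃ i ∈ l, p i ∧ f i = m := by
  induction l generalizing acc with
  | nil => simp_all
  | cons x xs ih =>
    simp only [List.foldl_cons] at h
    rcases ih _ h with hacc | ⟨i, hi, hp, hf⟩
    · by_cases hp : p x
      · rw [if_pos hp] at hacc
        cases acc with
        | none => simp at hacc; exact Or.inr ⟨x, List.mem_cons_self, hp, hacc⟩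
        | some y =>
          simp at hacc
          rcases max_choice y (f x) with hc | hc
          · exact Or.inl (by rw [← hacc, hc])
          · exact Or.inr ⟨x, List.mem_cons_self, hp, by omega⟩
      · rw [if_neg hp] at hacc; exact Or.inl hacc
    · exact Or.inr ⟨i, List.mem_cons_of_mem _ hi, hp, hf⟩

-- ---- first-hit characterisation of the two break loops ----

theorem lowLoop_eq (arr : List Int) (mo : Option Int) (l : List Int) (i0 : Int)
    (hl : l.Pairwise (· < ·)) (hmem : i0 ∈ l)
    (hq : gtOpt (pvGet arr i0) mo = true)
    (hb : ∀ j ∈ l, j < i0 → gtOpt (pvGet arr j) mo = false) :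
    lowLoop arr mo l = i0 := by
  induction l with
  | nil => simp at hmem
  | cons x xs ih =>
    rcases List.pairwise_cons.mp hl with ⟨hx, hxs⟩
    by_cases hqx : gtOpt (pvGet arr x) mo = true
    · have hxi : x = i0 := by
        rcases List.mem_cons.mp hmem with rfl | hm
        · rfl
        · by_contra hne
          have hlt : x < i0 := hx _ hm
          simp [hb x List.mem_cons_self hlt] at hqx
      rw [lowLoop, if_pos hqx, hxi]
    · have hne : x ≠ i0 := fun h => hqx (h ▸ hq)
      rw [lowLoop, if_neg hqx]
      exact ih hxs ((List.mem_cons.mp hmem).resolve_left (fun h => hne h.symm))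
        (fun j hj hji => hb j (List.mem_cons_of_mem _ hj) hji)

theorem highLoop_eq (arr : List Int) (mo : Option Int) (l : List Int) (i0 : Int)
    (hl : l.Pairwise (· > ·)) (hmem : i0 ∈ l)
    (hq : ltOpt (pvGet arr i0) mo = true)
    (hb : ∀ j ∈ l, i0 < j → ltOpt (pvGet arr j) mo = false) :
    highLoop arr mo l = i0 := by
  induction l with
  | nil => simp at hmem
  | cons x xs ih =>
    rcases List.pairwise_cons.mp hl with ⟨hx, hxs⟩
    by_cases hqx : ltOpt (pvGet arr x) mo = true
    · have hxi : x = i0 := by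
        rcases List.mem_cons.mp hmem with rfl | hm
        · rfl
        · by_contra hne
          have hlt : i0 < x := hx _ hm
          simp [hb x List.mem_cons_self hlt] at hqx
      rw [highLoop, if_pos hqx, hxi]
    · have hne : x ≠ i0 := fun h => hqx (h ▸ hq)
      rw [highLoop, if_neg hqx]
      exact ih hxs ((List.mem_cons.mp hmem).resolve_left (fun h => hne h.symm))
        (fun j hj hji => hb j (List.mem_cons_of_mem _ hj) hji)

-- ---- firstDiff characterisation ----

theorem firstDiff_self (xs : List Int) : firstDiff xs xs = none := by
  induction xs with
  | nil => rfl
  | cons x xs ih => simp [firstDiff, ih]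

theorem firstDiff_eq_none (xs ys : List Int) (hlen : xs.length = ys.length)
    (h : firstDiff xs ys = none) : xs = ys := by
  induction xs generalizing ys with
  | nil => cases ys with | nil => rfl | cons y ys => simp at hlen
  | cons x xs ih =>
    cases ys with
    | nil => simp at hlen
    | cons y ys =>
      by_cases hxy : x = y
      · subst hxy
        have h' : firstDiff xs ys = none := by
          cases hfd : firstDiff xs ys with
          | none => rfl
          | some k => simp [firstDiff, hfd] at h
        exact congrArg (x :: ·) (ih ys (by simpa using hlen) h')
      · simp [firstDiff, hxy] at h

theorem firstDiff_spec (xs ys : List Int) (k : Nat) (h : firstDiff xs ys = some k) :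
    k < xs.length ∧ k < ys.length ∧ xs.getD k 0 ≠ ys.getD k 0 ∧
      ∀ j < k, xs.getD j 0 = ys.getD j 0 := by
  induction xs generalizing ys k with
  | nil => simp [firstDiff] at h
  | cons x xs ih =>
    cases ys with
    | nil => simp [firstDiff] at h
    | cons y ys =>
      by_cases hxy : x = y
      · subst hxy
        obtain ⟨k', hk', rfl⟩ : ∃ k', firstDiff xs ys = some k' ∧ k = k' + 1 := by
          cases hfd : firstDiff xs ys with
          | none => simp [firstDiff, hfd] at h
          | some k' => exact ⟨k', rfl, by simpa [firstDiff, hfd] using h.symm⟩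
        rcases ih ys k' hk' with ⟨h1, h2, h3, h4⟩
        refine ⟨by simpa using h1, by simpa using h2, by simpa using h3, ?_⟩
        intro j hj
        cases j with
        | zero => simp
        | succ j => simpa using h4 j (by omega)
      · have hk : k = 0 := by simpa [firstDiff, hxy] using h.symm
        subst hk
        exact ⟨by simp, by simp, by simpa using hxy, by omega⟩

-- ---- small index/membership helpers (getD phrasing) ----

theorem getD_reverse (l : List Int) (j : Nat) (h : j < l.length) :
    l.reverse.getD j 0 = l.getD (l.length - 1 - j) 0 := by
  rw [List.getD_eq_getElem l.reverse 0 (by simpa using h),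
      List.getD_eq_getElem l 0 (by omega), List.getElem_reverse]

theorem mem_drop_of_getD (l : List Int) (t m : Nat) (ht : t ≤ m) (hm : m < l.length) :
    l.getD m 0 ∈ l.drop t := by
  rw [List.getD_eq_getElem l 0 hm]
  have h2 : m - t < (l.drop t).length := by simp; omega
  have : (l.drop t)[m - t] = l[m] := by
    rw [List.getElem_drop]
    congr 1
    omega
  exact this ▸ List.getElem_mem h2

theorem exists_idx_of_mem_drop (l : List Int) (t : Nat) (x : Int) (h : x ∈ l.drop t) :
    ∃ m, t ≤ m ∧ m < l.length ∧ l.getD m 0 = x := by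
  rcases List.mem_iff_getElem.mp h with ⟨k, hk, hkx⟩
  have hkl : t + k < l.length := by simp at hk; omega
  refine ⟨t + k, by omega, hkl, ?_⟩
  rw [List.getD_eq_getElem l 0 hkl, ← List.getElem_drop]
  exact hkx

theorem mem_take_of_getD (l : List Int) (t m : Nat) (hm : m < t) (h : m < l.length) :
    l.getD m 0 ∈ l.take t := by
  rw [List.getD_eq_getElem l 0 h]
  have h2 : m < (l.take t).length := by simp; omega
  have : (l.take t)[m] = l[m] := List.getElem_take
  exact this ▸ List.getElem_mem h2

theorem exists_idx_of_mem_take (l : List Int) (t : Nat) (x : Int) (h : x ∈ l.take t) :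
    ∃ m, m < t ∧ m < l.length ∧ l.getD m 0 = x := by
  rcases List.mem_iff_getElem.mp h with ⟨k, hk, hkx⟩
  have hkl : k < l.length := by simp at hk; omega
  have hkt : k < t := by simp at hk; omega
  refine ⟨k, hkt, hkl, ?_⟩
  rw [List.getD_eq_getElem l 0 hkl]
  rw [← hkx, List.getElem_take]

-- agreeing prefix ⇒ the two suffixes are permutations of each other
theorem drop_perm_of_prefix_agree (arr s : List Int) (hperm : s.Perm arr)
    (hlen : s.length = arr.length) (t : Nat)
    (hagree : ∀ j, j < t → arr.getD j 0 = s.getD j 0) :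
    (arr.drop t).Perm (s.drop t) := by
  have htake : arr.take t = s.take t := by
    apply List.ext_getElem (by simp; omega)
    intro i h1 h2
    have hi : i < arr.length := by simp at h1; omega
    have hi' : i < s.length := by omega
    have e1 : (arr.take t)[i] = arr[i] := List.getElem_take
    have e2 : (s.take t)[i] = s[i] := List.getElem_take
    rw [e1, e2, ← List.getD_eq_getElem arr 0 hi, ← List.getD_eq_getElem s 0 hi']
    exact hagree i (by simp at h1; omega)
  have h1 : (arr.take t ++ arr.drop t).Perm (arr.take t ++ s.drop t) := by
    nth_rewrite 2 [htake]
    rw [List.take_append_drop, List.take_append_drop]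
    exact hperm.symm
  exact (List.perm_append_left_iff _).mp h1

-- agreeing suffix ⇒ the two prefixes are permutations of each other
theorem take_perm_of_suffix_agree (arr s : List Int) (hperm : s.Perm arr)
    (hlen : s.length = arr.length) (t : Nat)
    (hagree : ∀ j, t ≤ j → j < arr.length → arr.getD j 0 = s.getD j 0) :
    (arr.take t).Perm (s.take t) := by
  have hdrop : arr.drop t = s.drop t := by
    apply List.ext_getElem (by simp; omega)
    intro i h1 h2
    have hi : t + i < arr.length := by simp at h1; omega
    have hi' : t + i < s.length := by omega
    rw [List.getElem_drop, List.getElem_drop,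
        ← List.getD_eq_getElem arr 0 hi, ← List.getD_eq_getElem s 0 hi']
    exact hagree (t + i) (by omega) (by omega)
  have h1 : (arr.take t ++ arr.drop t).Perm (s.take t ++ arr.drop t) := by
    nth_rewrite 2 [hdrop]
    rw [List.take_append_drop, List.take_append_drop]
    exact hperm.symm
  exact (List.perm_append_right_iff _).mp h1

-- sortedness of s as a getD fact
theorem sorted_getD_mono (arr : List Int) (p q : Nat) (hpq : p ≤ q)
    (hq : q < (PySem.List.sorted arr (fun x => x) false).length) :
    (PySem.List.sorted arr (fun x => x) false).getD p 0 ≤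
      (PySem.List.sorted arr (fun x => x) false).getD q 0 := by
  rcases eq_or_lt_of_le hpq with rfl | hlt
  · exact le_rfl
  · rw [List.getD_eq_getElem _ 0 (by omega), List.getD_eq_getElem _ 0 hq]
    have hp := (List.pairwise_iff_getElem.mp (PySem.List.sorted_pairwise arr (fun x => x)))
    exact hp p q (by omega) hq hlt

-- ---- the heart of the argument ----
-- Throughout: s is a sorted permutation of arr (hmono states sortedness as a getD fact).

-- every element strictly before the first mismatch is ≤ every descent bottom
theorem prefix_le_desc (arr s : List Int) (hperm : s.Perm arr) (hlen : s.length = arr.length)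
    (hmono : ∀ p q, p ≤ q → q < s.length → s.getD p 0 ≤ s.getD q 0)
    (lo : Nat) (hagree : ∀ j, j < lo → arr.getD j 0 = s.getD j 0)
    (i : Nat) (hi : i < lo) (_hilen : i < arr.length)
    (j : Nat) (hd : pvDesc arr j) :
    pvA arr i ≤ pvA arr (j + 1) := by
  rcases hd with ⟨hj1, hj2⟩
  by_cases hcase : j + 1 ≤ i
  · exfalso
    have e1 : arr.getD j 0 = s.getD j 0 := hagree j (by omega)
    have e2 : arr.getD (j+1) 0 = s.getD (j+1) 0 := hagree (j+1) (by omega)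
    have := hmono j (j+1) (by omega) (by omega)
    simp only [pvA] at hj2
    omega
  · -- i < j+1 : arr[j+1] sits in the suffix past i, a permutation of s's suffix
    have hdp := drop_perm_of_prefix_agree arr s hperm hlen (i+1)
      (fun j hj => hagree j (by omega))
    have hmem : arr.getD (j+1) 0 ∈ arr.drop (i+1) :=
      mem_drop_of_getD arr (i+1) (j+1) (by omega) (by omega)
    have hmem' : arr.getD (j+1) 0 ∈ s.drop (i+1) := hdp.subset hmem
    rcases exists_idx_of_mem_drop s (i+1) _ hmem' with ⟨m, hm1, hm2, hm3⟩
    have e1 : arr.getD i 0 = s.getD i 0 := hagree i hi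
    have := hmono i m (by omega) hm2
    simp only [pvA]
    omega

-- at the first mismatch there is a descent whose bottom is strictly below arr[lo]
theorem lo_strict (arr s : List Int) (hperm : s.Perm arr) (hlen : s.length = arr.length)
    (hmono : ∀ p q, p ≤ q → q < s.length → s.getD p 0 ≤ s.getD q 0)
    (lo : Nat) (hagree : ∀ j, j < lo → arr.getD j 0 = s.getD j 0)
    (hne : arr.getD lo 0 ≠ s.getD lo 0) (hlo : lo < arr.length) :
    ∃ j, pvDesc arr j ∧ pvA arr (j + 1) < pvA arr lo := by
  have hdp := drop_perm_of_prefix_agree arr s hperm hlen lo hagree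
  -- s[lo] < arr[lo]
  have hmem : arr.getD lo 0 ∈ s.drop lo :=
    hdp.subset (mem_drop_of_getD arr lo lo le_rfl hlo)
  rcases exists_idx_of_mem_drop s lo _ hmem with ⟨m, hm1, hm2, hm3⟩
  have hvlt : s.getD lo 0 < arr.getD lo 0 := by
    have := hmono lo m hm1 hm2
    omega
  -- s[lo] occurs somewhere in arr[lo:]
  have hvmem : s.getD lo 0 ∈ arr.drop lo :=
    hdp.symm.subset (mem_drop_of_getD s lo lo le_rfl (by omega))
  rcases exists_idx_of_mem_drop arr lo _ hvmem with ⟨k, hk1, hk2, hk3⟩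
  -- least such position
  have hex : ∃ k, lo ≤ k ∧ k < arr.length ∧ arr.getD k 0 = s.getD lo 0 := ⟨k, hk1, hk2, hk3⟩
  classical
  let k0 := Nat.find hex
  obtain ⟨hk01, hk02, hk03⟩ : lo ≤ k0 ∧ k0 < arr.length ∧ arr.getD k0 0 = s.getD lo 0 :=
    Nat.find_spec hex
  have hk0lo : lo < k0 := by
    rcases Nat.lt_or_ge lo k0 with h | h
    · exact h
    · exfalso
      have : k0 = lo := by omega
      rw [this] at hk03
      omega
  -- arr[k0-1] > s[lo]
  have hj1mem : arr.getD (k0-1) 0 ∈ arr.drop lo :=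
    mem_drop_of_getD arr lo (k0-1) (by omega) (by omega)
  rcases exists_idx_of_mem_drop s lo _ (hdp.subset hj1mem) with ⟨m', hm'1, hm'2, hm'3⟩
  have hge : s.getD lo 0 ≤ arr.getD (k0-1) 0 := by
    have := hmono lo m' hm'1 hm'2
    omega
  have hnelt : arr.getD (k0-1) 0 ≠ s.getD lo 0 := by
    intro heq
    exact Nat.find_min hex (show k0 - 1 < k0 by omega) ⟨by omega, by omega, heq⟩
  refine ⟨k0 - 1, ⟨by omega, ?_⟩, ?_⟩
  · show pvA arr (k0 - 1 + 1) < pvA arr (k0 - 1)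
    simp only [pvA]
    have : k0 - 1 + 1 = k0 := by omega
    rw [this]
    omega
  · show pvA arr (k0 - 1 + 1) < pvA arr lo
    simp only [pvA]
    have : k0 - 1 + 1 = k0 := by omega
    rw [this]
    omega

-- every element strictly after the last mismatch is ≥ every descent top
theorem suffix_ge_desc (arr s : List Int) (hperm : s.Perm arr) (hlen : s.length = arr.length)
    (hmono : ∀ p q, p ≤ q → q < s.length → s.getD p 0 ≤ s.getD q 0)
    (hi : Nat) (hagree : ∀ j, hi < j → j < arr.length → arr.getD j 0 = s.getD j 0)
    (i : Nat) (hgt : hi < i) (hilen : i < arr.length)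
    (j : Nat) (hd : pvDesc arr j) :
    pvA arr j ≤ pvA arr i := by
  rcases hd with ⟨hj1, hj2⟩
  by_cases hcase : i ≤ j
  · exfalso
    have e1 : arr.getD j 0 = s.getD j 0 := hagree j (by omega) (by omega)
    have e2 : arr.getD (j+1) 0 = s.getD (j+1) 0 := hagree (j+1) (by omega) (by omega)
    have := hmono j (j+1) (by omega) (by omega)
    simp only [pvA] at hj2
    omega
  · -- j < i : arr[j] sits in the prefix before i, a permutation of s's prefix
    have htp := take_perm_of_suffix_agree arr s hperm hlen i
      (fun j' hj' hj'2 => hagree j' (by omega) hj'2)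
    have hmem : arr.getD j 0 ∈ arr.take i := mem_take_of_getD arr i j (by omega) (by omega)
    rcases exists_idx_of_mem_take s i _ (htp.subset hmem) with ⟨m, hm1, hm2, hm3⟩
    have e1 : arr.getD i 0 = s.getD i 0 := hagree i hgt hilen
    have := hmono m i (by omega) (by omega)
    simp only [pvA]
    omega

-- at the last mismatch there is a descent whose top is strictly above arr[hi]
theorem hi_strict (arr s : List Int) (hperm : s.Perm arr) (hlen : s.length = arr.length)
    (hmono : ∀ p q, p ≤ q → q < s.length → s.getD p 0 ≤ s.getD q 0)
    (hi : Nat) (hagree : ∀ j, hi < j → j < arr.length → arr.getD j 0 = s.getD j 0)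
    (hne : arr.getD hi 0 ≠ s.getD hi 0) (hhi : hi < arr.length) :
    ∃ j, pvDesc arr j ∧ pvA arr hi < pvA arr j := by
  have htp := take_perm_of_suffix_agree arr s hperm hlen (hi+1)
    (fun j hj hj2 => hagree j (by omega) hj2)
  -- arr[hi] < s[hi]
  have hmem : arr.getD hi 0 ∈ s.take (hi+1) :=
    htp.subset (mem_take_of_getD arr (hi+1) hi (by omega) hhi)
  rcases exists_idx_of_mem_take s (hi+1) _ hmem with ⟨m, hm1, hm2, hm3⟩
  have hvgt : arr.getD hi 0 < s.getD hi 0 := by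
    have := hmono m hi (by omega) (by omega)
    omega
  -- s[hi] occurs somewhere in arr[:hi+1]
  have hvmem : s.getD hi 0 ∈ arr.take (hi+1) :=
    htp.symm.subset (mem_take_of_getD s (hi+1) hi (by omega) (by omega))
  rcases exists_idx_of_mem_take arr (hi+1) _ hvmem with ⟨k, hk1, hk2, hk3⟩
  -- greatest such position, found as hi - (least offset)
  have hex : ∃ d, d ≤ hi ∧ arr.getD (hi - d) 0 = s.getD hi 0 := ⟨hi - k, by omega, by
    have : hi - (hi - k) = k := by omega
    rw [this]; exact hk3⟩
  classical
  let d0 := Nat.find hex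
  obtain ⟨hd01, hd02⟩ : d0 ≤ hi ∧ arr.getD (hi - d0) 0 = s.getD hi 0 := Nat.find_spec hex
  have hd0pos : 0 < d0 := by
    rcases Nat.eq_zero_or_pos d0 with h | h
    · exfalso
      apply hne
      have h2 := hd02
      rw [h, Nat.sub_zero] at h2
      exact h2
    · exact h
  set k0 := hi - d0 with hk0def
  have hk0hi : k0 < hi := by omega
  -- arr[k0+1] < s[hi]
  have hmem1 : arr.getD (k0+1) 0 ∈ arr.take (hi+1) :=
    mem_take_of_getD arr (hi+1) (k0+1) (by omega) (by omega)
  rcases exists_idx_of_mem_take s (hi+1) _ (htp.subset hmem1) with ⟨m', hm'1, hm'2, hm'3⟩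
  have hle : arr.getD (k0+1) 0 ≤ s.getD hi 0 := by
    have := hmono m' hi (by omega) (by omega)
    omega
  have hnelt : arr.getD (k0+1) 0 ≠ s.getD hi 0 := by
    intro heq
    refine Nat.find_min hex (show d0 - 1 < d0 by omega) ⟨by omega, ?_⟩
    have : hi - (d0 - 1) = k0 + 1 := by omega
    rw [this]
    exact heq
  refine ⟨k0, ⟨by omega, ?_⟩, ?_⟩
  · show pvA arr (k0 + 1) < pvA arr k0
    simp only [pvA]
    omega
  · show pvA arr hi < pvA arr k0
    simp only [pvA]
    omega

-- ===== the main equivalence, by the sorted-window argument =====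

theorem main_equiv (arr : List Int) : mim_window_sort arr = mim_window_sort_alt arr := by
  have hlen : (PySem.List.sorted arr (fun x => x) false).length = arr.length :=
    PySem.List.length_sorted arr _ false
  have hperm := PySem.List.sorted_perm arr (fun x => x) false
  have hmono := sorted_getD_mono arr
  set s := PySem.List.sorted arr (fun x => x) false with hs
  by_cases hsorted : arr.Pairwise (· ≤ ·)
  · -- already sorted: both sides return 0
    have hseq : s = arr := by
      rw [hs]
      exact PySem.List.sorted_eq_self_of_pairwise arr (fun x => x) hsorted
    have hB : mim_window_sort_alt arr = 0 := by
      unfold mim_window_sort_alt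
      rw [← hs, hseq]
      simp [firstDiff_self]
    have hadj : ∀ k : Nat, 1 ≤ k → k < arr.length → ¬ (pvA arr k < pvA arr (k - 1)) := by
      intro k h1 h2
      have := List.pairwise_iff_getElem.mp hsorted (k - 1) k (by omega) h2 (by omega)
      simp only [pvA]
      rw [List.getD_eq_getElem _ 0 h2, List.getD_eq_getElem _ 0 (show k - 1 < arr.length by omega)]
      omega
    have hmimn : mimLoop arr = none := by
      unfold mimLoop
      refine (foldMin_none_iff _ _ _ _).mpr ⟨rfl, ?_⟩
      intro i hi
      rw [PySem.List.mem_pyRange_one] at hi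
      obtain ⟨k, rfl⟩ : ∃ k : Nat, i = (k : Int) := ⟨i.toNat, (Int.toNat_of_nonneg (by omega)).symm⟩
      have hk1 : 1 ≤ k := by omega
      have hk2 : k < arr.length := by omega
      have e2 : ((k : Int) - 1) = ((k - 1 : Nat) : Int) := by omega
      rw [pvGet_natCast, e2, pvGet_natCast]
      exact hadj k hk1 hk2
    have hmaxn : maxLoop arr = none := by
      unfold maxLoop
      refine (foldMax_none_iff _ _ _ _).mpr ⟨rfl, ?_⟩
      intro i hi
      rw [PySem.List.mem_pyRange_neg_one] at hi
      obtain ⟨k, rfl⟩ : ∃ k : Nat, i = (k : Int) := ⟨i.toNat, (Int.toNat_of_nonneg (by omega)).symm⟩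
      have hk2 : k + 1 < arr.length := by omega
      have e2 : ((k : Int) + 1) = ((k + 1 : Nat) : Int) := by omega
      rw [pvGet_natCast, e2, pvGet_natCast]
      have := hadj (k + 1) (by omega) hk2
      simp only [show k + 1 - 1 = k from rfl] at this
      simp only [gt_iff_lt]
      omega
    have hA : mim_window_sort arr = 0 := by
      simp [mim_window_sort, hmimn, hmaxn]
    rw [hA, hB]
  · -- not sorted: both sides return hi - lo + 1 for the first/last sorted-mismatch window
    have hdesc : ∃ j, pvDesc arr j := by
      by_contra hno
      apply hsorted
      rw [← List.isChain_iff_pairwise, List.isChain_iff_getElem]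
      intro i hi2
      by_contra hlt
      push Not at hlt
      refine hno ⟨i, hi2, ?_⟩
      simp only [pvA]
      rw [List.getD_eq_getElem _ 0 hi2, List.getD_eq_getElem _ 0 (show i < arr.length by omega)]
      omega
    have hns : arr ≠ s := by
      intro h
      apply hsorted
      have hp := PySem.List.sorted_pairwise arr (fun x : Int => x)
      rw [← hs] at hp
      rw [h]
      simpa using hp
    cases hfd : firstDiff arr s with
    | none => exact absurd (firstDiff_eq_none arr s (by omega) hfd) hns
    | some lo =>
    obtain ⟨hlo1, hlo2, hlo3, hlo4⟩ := firstDiff_spec arr s lo hfd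
    cases hfr : firstDiff arr.reverse s.reverse with
    | none =>
      have := firstDiff_eq_none _ _ (by simp [hlen]) hfr
      exact absurd (List.reverse_inj.mp this) hns
    | some r =>
    obtain ⟨hr1, hr2, hr3, hr4⟩ := firstDiff_spec _ _ r hfr
    simp only [List.length_reverse] at hr1 hr2
    have hr2' : r < arr.length := by omega
    set hi := arr.length - 1 - r with hhidef
    have hi_lt : hi < arr.length := by omega
    have hhine : arr.getD hi 0 ≠ s.getD hi 0 := by
      rw [getD_reverse arr r hr2', getD_reverse s r (by omega), hlen] at hr3
      exact hr3
    have hhagree : ∀ j, hi < j → j < arr.length → arr.getD j 0 = s.getD j 0 := by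
      intro j hj1 hj2
      have := hr4 (arr.length - 1 - j) (by omega)
      rw [getD_reverse arr (arr.length - 1 - j) (by omega),
          getD_reverse s (arr.length - 1 - j) (by omega), hlen] at this
      have e : arr.length - 1 - (arr.length - 1 - j) = j := by omega
      rw [e] at this
      exact this
    -- the mim_num loop produced some value mi = min of the descent bottoms
    obtain ⟨j0, hj0⟩ := hdesc
    have hj0len : j0 + 1 < arr.length := hj0.1
    obtain ⟨mi, hmi⟩ : ∃ mi, mimLoop arr = some mi := by
      cases h : mimLoop arr with
      | some mi => exact ⟨mi, rfl⟩
      | none =>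
        exfalso
        unfold mimLoop at h
        have hall := ((foldMin_none_iff _ _ _ _).mp h).2
        refine hall ((j0 + 1 : Nat) : Int) (PySem.List.mem_pyRange_one.mpr ⟨by omega, by
          exact_mod_cast hj0len⟩) ?_
        have e2 : (((j0 + 1 : Nat) : Int) - 1) = ((j0 : Nat) : Int) := by omega
        rw [pvGet_natCast, e2, pvGet_natCast]
        exact hj0.2
    obtain ⟨mx, hmx⟩ : ∃ mx, maxLoop arr = some mx := by
      cases h : maxLoop arr with
      | some mx => exact ⟨mx, rfl⟩
      | none =>
        exfalso
        unfold maxLoop at h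
        have hall := ((foldMax_none_iff _ _ _ _).mp h).2
        refine hall ((j0 : Nat) : Int) (PySem.List.mem_pyRange_neg_one.mpr ⟨by omega, by
          omega⟩) ?_
        have e2 : (((j0 : Nat) : Int) + 1) = ((j0 + 1 : Nat) : Int) := by omega
        rw [pvGet_natCast, e2, pvGet_natCast]
        exact hj0.2
    have hmi_le : ∀ j, pvDesc arr j → mi ≤ pvA arr (j + 1) := by
      intro j hd
      unfold mimLoop at hmi
      have := (foldMin_le _ _ _ _ _ hmi).2 ((j + 1 : Nat) : Int)
        (PySem.List.mem_pyRange_one.mpr ⟨by omega, by exact_mod_cast hd.1⟩)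
      have e2 : (((j + 1 : Nat) : Int) - 1) = ((j : Nat) : Int) := by omega
      rw [pvGet_natCast, e2, pvGet_natCast] at this
      exact this hd.2
    have hmi_mem : ∃ j, pvDesc arr j ∧ pvA arr (j + 1) = mi := by
      unfold mimLoop at hmi
      rcases foldMin_mem _ _ _ _ _ hmi with hacc | ⟨i, hiR, hp, hf⟩
      · simp at hacc
      · rw [PySem.List.mem_pyRange_one] at hiR
        obtain ⟨k, rfl⟩ : ∃ k : Nat, i = (k : Int) :=
          ⟨i.toNat, (Int.toNat_of_nonneg (by omega)).symm⟩
        have hk1 : 1 ≤ k := by omega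
        have hk2 : k < arr.length := by omega
        have e2 : ((k : Int) - 1) = ((k - 1 : Nat) : Int) := by omega
        rw [pvGet_natCast, e2, pvGet_natCast] at hp
        rw [pvGet_natCast] at hf
        refine ⟨k - 1, ⟨by omega, ?_⟩, ?_⟩
        · have e3 : k - 1 + 1 = k := by omega
          rw [e3]
          exact hp
        · have e3 : k - 1 + 1 = k := by omega
          rw [e3]
          exact hf
    have hmx_ge : ∀ j, pvDesc arr j → pvA arr j ≤ mx := by
      intro j hd
      unfold maxLoop at hmx
      have := (foldMax_ge _ _ _ _ _ hmx).2 ((j : Nat) : Int)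
        (PySem.List.mem_pyRange_neg_one.mpr ⟨by omega, by
          have := hd.1; omega⟩)
      have e2 : (((j : Nat) : Int) + 1) = ((j + 1 : Nat) : Int) := by omega
      rw [pvGet_natCast, e2, pvGet_natCast] at this
      exact this hd.2
    have hmx_mem : ∃ j, pvDesc arr j ∧ pvA arr j = mx := by
      unfold maxLoop at hmx
      rcases foldMax_mem _ _ _ _ _ hmx with hacc | ⟨i, hiR, hp, hf⟩
      · simp at hacc
      · rw [PySem.List.mem_pyRange_neg_one] at hiR
        obtain ⟨k, rfl⟩ : ∃ k : Nat, i = (k : Int) :=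
          ⟨i.toNat, (Int.toNat_of_nonneg (by omega)).symm⟩
        have hk2 : k + 1 < arr.length := by omega
        have e2 : ((k : Int) + 1) = ((k + 1 : Nat) : Int) := by omega
        rw [pvGet_natCast, e2, pvGet_natCast] at hp
        rw [pvGet_natCast] at hf
        exact ⟨k, ⟨hk2, hp⟩, hf⟩
    -- the two break loops find exactly the first and last mismatch positions
    have hlow : lowLoop arr (some mi) (PySem.List.pyRange 0 (arr.length : Int) 1) = (lo : Int) := by
      apply lowLoop_eq
      · exact PySem.List.pairwise_lt_pyRange_one 0 (arr.length : Int)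
      · exact PySem.List.mem_pyRange_one.mpr ⟨by omega, by exact_mod_cast hlo1⟩
      · rw [pvGet_natCast]
        obtain ⟨jd, hjd, hjlt⟩ := lo_strict arr s hperm hlen hmono lo hlo4 hlo3 hlo1
        have := hmi_le jd hjd
        simp only [gtOpt, decide_eq_true_eq]
        simp only [pvA] at *
        omega
      · intro j hj hjlo
        rw [PySem.List.mem_pyRange_one] at hj
        obtain ⟨k, rfl⟩ : ∃ k : Nat, j = (k : Int) :=
          ⟨j.toNat, (Int.toNat_of_nonneg (by omega)).symm⟩
        have hklo : k < lo := by omega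
        rw [pvGet_natCast]
        obtain ⟨jd, hjd, hjeq⟩ := hmi_mem
        have := prefix_le_desc arr s hperm hlen hmono lo hlo4 k hklo (by omega) jd hjd
        simp only [gtOpt, decide_eq_false_iff_not, not_lt]
        simp only [pvA] at *
        omega
    have hhigh : highLoop arr (some mx)
        (PySem.List.pyRange ((arr.length : Int) - 1) (-1) (-1)) = (hi : Int) := by
      apply highLoop_eq
      · rw [PySem.List.pyRange_neg_one_eq_reverse]
        have e : (-1 : Int) + 1 = 0 := by omega
        have e2 : (arr.length : Int) - 1 + 1 = (arr.length : Int) := by omega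
        rw [e, e2]
        exact List.pairwise_reverse.mpr (by
          have := PySem.List.pairwise_lt_pyRange_one 0 (arr.length : Int)
          exact this.imp (fun h => h))
      · exact PySem.List.mem_pyRange_neg_one.mpr ⟨by omega, by
          have : (hi : Int) ≤ (arr.length : Int) - 1 := by exact_mod_cast (by omega : (hi : Int) ≤ (arr.length : Int) - 1)
          omega⟩
      · rw [pvGet_natCast]
        obtain ⟨jd, hjd, hjgt⟩ := hi_strict arr s hperm hlen hmono hi hhagree hhine hi_lt
        have := hmx_ge jd hjd
        simp only [ltOpt, decide_eq_true_eq]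
        simp only [pvA] at *
        omega
      · intro j hj hjhi
        rw [PySem.List.mem_pyRange_neg_one] at hj
        obtain ⟨k, rfl⟩ : ∃ k : Nat, j = (k : Int) :=
          ⟨j.toNat, (Int.toNat_of_nonneg (by omega)).symm⟩
        have hkhi : hi < k := by omega
        have hkn : k < arr.length := by omega
        rw [pvGet_natCast]
        obtain ⟨jd, hjd, hjeq⟩ := hmx_mem
        have := suffix_ge_desc arr s hperm hlen hmono hi hhagree k hkhi hkn jd hjd
        simp only [ltOpt, decide_eq_false_iff_not, not_lt]
        simp only [pvA] at *
        omega
    -- assemble both sides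
    have hA : mim_window_sort arr = (hi : Int) - (lo : Int) + 1 := by
      simp only [mim_window_sort, hmi, hmx]
      rw [hlow, hhigh]
      simp
    have hB : mim_window_sort_alt arr = ((arr.length : Int) - 1 - (r : Int)) - (lo : Int) + 1 := by
      unfold mim_window_sort_alt
      rw [← hs]
      simp [hfd, hfr]
    rw [hA, hB]
    have : (hi : Int) = (arr.length : Int) - 1 - (r : Int) := by
      rw [hhidef]
      omega
    omega

-- ===== VERDICT (by name: the statement is the Claim_ definition above) =====
theorem mim_window_sort_spec : Claim_equal_mim_window_sort := by
  intro arr _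
  unfold Spec_mim_window_sort
  exact main_equiv arr
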